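-- pv_equiv track=rewrite | github.com/wangziming0915/Github-Portfolio | BFSMaze.py | BFSMaze
-- ===== SOURCE A (Python) =====
-- def BFSMaze(maze, start, destination):
--     rows, cols = len(maze), len(maze[0])
--     visited = set()
--
--     def dfs(x, y):
--         if (x, y) == tuple(destination):
--             return True
--
--         if (x, y) in visited:
--             return False
--
--         visited.add((x, y))
--
--         # Move in four directions: up, down, left, right
--         directions = [(0, 1), (0, -1), (1, 0), (-1, 0)]
--         for dx, dy in directions:
--             new_x, new_y = x, y
--             while 0 <= new_x + dx < rows and 0 <= new_y + dy < cols and maze[new_x + dx][new_y + dy] == 0: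
--                 new_x += dx
--                 new_y += dy
--             if dfs(new_x, new_y):
--                 return True
--
--         return False
--
--     return dfs(start[0], start[1])
-- ===== SOURCE B (Python) =====
-- def BFSMaze(maze, start, destination):
--     rows, cols = len(maze), len(maze[0])
--     dest = tuple(destination)
--     stack = [(start[0], start[1])]
--     visited = set()
--     while stack:
--         x, y = stack.pop()
--         if (x, y) == dest:
--             return True
--         if (x, y) in visited:
--             continue
--         visited.add((x, y))
--         for dx, dy in ((-1, 0), (1, 0), (0, -1), (0, 1)):
--             nx, ny = x, y
--             while 0 <= nx + dx < rows and 0 <= ny + dy < cols and maze[nx + dx][ny + dy] == 0: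
--                 nx += dx
--                 ny += dy
--             stack.append((nx, ny))
--     return False
-- ===== Notes on version B (the rewrite author's own statement) =====
-- stated objective: alternative
-- what changed: Replaces the recursive dfs with a mutable visited set by an iterative explicit-stack search that pops a position, tests destination, skips visited, and pushes the four roll-to-wall stop positions; recursion and the nested helper function disappear.
-- outside the precondition, e.g. on BFSMaze([[1, 1], [1]], [0, 0], [0, 0]): A returns True, B returns True
import Mathlib
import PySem

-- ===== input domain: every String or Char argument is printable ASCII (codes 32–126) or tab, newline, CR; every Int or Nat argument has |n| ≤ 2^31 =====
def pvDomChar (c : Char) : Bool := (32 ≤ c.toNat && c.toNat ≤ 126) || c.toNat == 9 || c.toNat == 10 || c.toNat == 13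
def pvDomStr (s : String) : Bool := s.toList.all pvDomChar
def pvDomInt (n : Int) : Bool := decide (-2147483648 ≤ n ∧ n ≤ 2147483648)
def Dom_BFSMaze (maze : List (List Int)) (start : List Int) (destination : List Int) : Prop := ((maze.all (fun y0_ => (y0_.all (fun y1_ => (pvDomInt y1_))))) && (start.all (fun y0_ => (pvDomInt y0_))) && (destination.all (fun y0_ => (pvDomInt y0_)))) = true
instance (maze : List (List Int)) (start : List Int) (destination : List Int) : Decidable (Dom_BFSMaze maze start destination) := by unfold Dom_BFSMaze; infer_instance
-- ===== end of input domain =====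

-- B replaces A's recursive dfs (nested closure + mutable visited set) by an iterative
-- explicit-stack search over the same roll-to-wall moves; same return value (alternative
-- decomposition, no speed claim).

-- ===== shared helpers (both Pythons contain the identical '(x,y)==tuple(destination)'
-- test and the identical roll-until-wall while loop) =====

-- (x, y) == tuple(destination)
def pvIsDest (destination : List Int) (x y : Int) : Bool :=
  match destination with
  | [a, b] => x == a && y == b
  | _ => false

-- maze[i][j]; the default 1 is only reachable on ragged mazes excluded by Pre_ (Python raises there)
def pvCell (maze : List (List Int)) (i j : Int) : Int :=
  PySem.List.pyGetD (PySem.List.pyGetD maze i []) j 1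

-- the inner while loop: roll from (x,y) in direction (dx,dy) until a wall/boundary.
-- fuel is a totality device only; pvRollFuel steps always suffice (each step lands inside the grid).
def pvRoll (maze : List (List Int)) (rows cols dx dy : Int) : Nat → Int → Int → Int × Int
  | 0, x, y => (x, y)
  | f + 1, x, y =>
    if 0 ≤ x + dx ∧ x + dx < rows ∧ 0 ≤ y + dy ∧ y + dy < cols ∧ pvCell maze (x + dx) (y + dy) == 0
    then pvRoll maze rows cols dx dy f (x + dx) (y + dy)
    else (x, y)

def pvRollFuel (maze : List (List Int)) : Nat := maze.length + (maze.headD []).length + 1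

-- search fuel: one unit per newly expanded position; |{start} ∪ grid| + 1 always suffices
def pvFuel (maze : List (List Int)) : Nat := maze.length * (maze.headD []).length + 2

-- ===== PORT A =====
-- A's recursive dfs, visited set threaded through; fold over the direction list in A's order.
mutual
def pvDfsA (maze : List (List Int)) (rows cols : Int) (destination : List Int) :
    Nat → PySem.Set (Int × Int) → Int → Int → Bool × PySem.Set (Int × Int)
  | f, vis, x, y =>
    if pvIsDest destination x y then (true, vis)
    else if PySem.Set.contains vis (x, y) then (false, vis)
    else
      let vis' := PySem.Set.add vis (x, y)
      match f with
      | 0 => (false, vis')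
      | f + 1 => pvDfsFold maze rows cols destination f vis' x y [(0, 1), (0, -1), (1, 0), (-1, 0)]
termination_by f => (f, 0, 0)

def pvDfsFold (maze : List (List Int)) (rows cols : Int) (destination : List Int) :
    Nat → PySem.Set (Int × Int) → Int → Int → List (Int × Int) → Bool × PySem.Set (Int × Int)
  | _, vis, _, _, [] => (false, vis)
  | f, vis, x, y, d :: ds =>
    let p := pvRoll maze rows cols d.1 d.2 (pvRollFuel maze) x y
    match pvDfsA maze rows cols destination f vis p.1 p.2 with
    | (true, v) => (true, v)
    | (false, v) => pvDfsFold maze rows cols destination f v x y ds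
termination_by f _ _ _ ds => (f, 1, ds.length)
end

def BFSMaze (maze : List (List Int)) (start : List Int) (destination : List Int) : Bool :=
  match start with
  | s0 :: s1 :: _ =>
    (pvDfsA maze (maze.length : Int) ((maze.headD []).length : Int) destination
      (pvFuel maze) PySem.Set.empty s0 s1).1
  | _ => false    -- Python raises IndexError here (start too short); excluded by Pre_

-- ===== PORT B =====
-- B's while loop over an explicit stack; Python pops/appends at the END of the list, so the
-- Lean stack keeps its TOP AT THE HEAD: pop() = head, extend(nbrs) = (nbrs.reverse ++ ·).
def pvRunB (maze : List (List Int)) (rows cols : Int) (destination : List Int)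
    (f : Nat) (st : List (Int × Int)) (vis : PySem.Set (Int × Int)) : Bool :=
  match st with
  | [] => false
  | (x, y) :: st =>
    if pvIsDest destination x y then true
    else if PySem.Set.contains vis (x, y) then pvRunB maze rows cols destination f st vis
    else
      match f with
      | 0 => false
      | f + 1 =>
        pvRunB maze rows cols destination f
          ((([((-1 : Int), (0 : Int)), (1, 0), (0, -1), (0, 1)].map
              (fun d => pvRoll maze rows cols d.1 d.2 (pvRollFuel maze) x y)).reverse) ++ st)
          (PySem.Set.add vis (x, y))
termination_by (f, st.length)

def BFSMaze_alt (maze : List (List Int)) (start : List Int) (destination : List Int) : Bool :=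
  match start with
  | s0 :: s1 :: _ =>
    pvRunB maze (maze.length : Int) ((maze.headD []).length : Int) destination
      (pvFuel maze) [(s0, s1)] PySem.Set.empty
  | _ => false    -- Python raises IndexError here (start too short); excluded by Pre_

-- ===== PRECONDITION & SPEC =====
-- Pre_ excludes exactly the inputs where the Python can raise IndexError: an empty maze
-- (len(maze[0])), a start list shorter than 2 (start[1]), and a ragged maze with some row
-- shorter than row 0 (rolling may index past the short row). On some ragged mazes A happens
-- to return before ever touching the short row; those are also excluded (see claim cites).
def Pre_BFSMaze (maze : List (List Int)) (start : List Int) (destination : List Int) : Prop :=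
  maze ≠ [] ∧ 2 ≤ start.length ∧ ∀ row ∈ maze, (maze.headD []).length ≤ row.length
instance (maze : List (List Int)) (start : List Int) (destination : List Int) : Decidable (Pre_BFSMaze maze start destination) := by unfold Pre_BFSMaze; infer_instance

def pvWitness_BFSMaze : List (List Int) × List Int × List Int := ([[0, 0], [1, 0]], [0, 0], [1, 1])

def Spec_BFSMaze (maze : List (List Int)) (start : List Int) (destination : List Int) (out : Bool) : Prop := out = BFSMaze_alt maze start destination
instance (maze : List (List Int)) (start : List Int) (destination : List Int) (out : Bool) : Decidable (Spec_BFSMaze maze start destination out) := by unfold Spec_BFSMaze; infer_instance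

-- ===== CLAIM (what is proved, stated in full; the proofs are below) =====
def Claim_equal_BFSMaze : Prop := ∀ (maze : List (List Int)) (start : List Int) (destination : List Int), Dom_BFSMaze maze start destination → Pre_BFSMaze maze start destination → Spec_BFSMaze maze start destination (BFSMaze maze start destination)

-- ===== LEMMAS AND PROOFS =====

-- the in-grid positions
def pvGrid (rows cols : Int) : List (Int × Int) :=
  (List.range rows.toNat).flatMap (fun i => (List.range cols.toNat).map (fun j => (Int.ofNat i, Int.ofNat j)))

-- measure: number of universe positions not yet visited
def pvM (U : List (Int × Int)) (vis : List (Int × Int)) : Nat :=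
  (U.toFinset \ vis.toFinset).card

lemma pvRunB_nil (maze : List (List Int)) (rows cols : Int) (destination : List Int)
    (f : Nat) (vis : PySem.Set (Int × Int)) :
    pvRunB maze rows cols destination f [] vis = false := by
  rw [pvRunB]

lemma pvRunB_cons (maze : List (List Int)) (rows cols : Int) (destination : List Int)
    (f : Nat) (x y : Int) (st : List (Int × Int)) (vis : PySem.Set (Int × Int)) :
    pvRunB maze rows cols destination f ((x, y) :: st) vis =
      (if pvIsDest destination x y then true
       else if PySem.Set.contains vis (x, y) then pvRunB maze rows cols destination f st vis
       else
         match f with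
         | 0 => false
         | f + 1 =>
           pvRunB maze rows cols destination f
             ((([((-1 : Int), (0 : Int)), (1, 0), (0, -1), (0, 1)].map
                 (fun d => pvRoll maze rows cols d.1 d.2 (pvRollFuel maze) x y)).reverse) ++ st)
             (PySem.Set.add vis (x, y))) := by
  rw [pvRunB.eq_def]

lemma mem_pvGrid (rows cols : Int) (x y : Int) :
    (x, y) ∈ pvGrid rows cols ↔ 0 ≤ x ∧ x < rows ∧ 0 ≤ y ∧ y < cols := by
  unfold pvGrid
  rw [List.mem_flatMap]
  constructor
  · rintro ⟨i, hi, hm⟩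
    rw [List.mem_map] at hm
    obtain ⟨j, hj, hjeq⟩ := hm
    rw [List.mem_range] at hi hj
    rw [Prod.mk.injEq] at hjeq
    obtain ⟨e1, e2⟩ := hjeq
    simp only [Int.ofNat_eq_natCast] at e1 e2
    omega
  · rintro ⟨h1, h2, h3, h4⟩
    refine ⟨x.toNat, List.mem_range.2 (by omega), List.mem_map.2 ⟨y.toNat, List.mem_range.2 (by omega), ?_⟩⟩
    rw [Prod.mk.injEq]
    simp only [Int.ofNat_eq_natCast]
    constructor <;> omega

lemma pvRoll_closed (maze : List (List Int)) (rows cols dx dy : Int)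
    (U : List (Int × Int)) (HG : ∀ p ∈ pvGrid rows cols, p ∈ U) :
    ∀ (f : Nat) (x y : Int), (x, y) ∈ U → pvRoll maze rows cols dx dy f x y ∈ U := by
  intro f
  induction f with
  | zero => intro x y h; simpa [pvRoll] using h
  | succ f ih =>
    intro x y h
    rw [pvRoll]
    split
    · rename_i hc
      exact ih (x + dx) (y + dy) (HG _ ((mem_pvGrid rows cols _ _).2 ⟨hc.1, hc.2.1, hc.2.2.1, hc.2.2.2.1⟩))
    · exact h

lemma pvM_le_of_subset (U : List (Int × Int)) {vis vis' : List (Int × Int)}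
    (h : vis ⊆ vis') : pvM U vis' ≤ pvM U vis := by
  apply Finset.card_le_card
  apply Finset.sdiff_subset_sdiff (Finset.Subset.refl _)
  intro q hq
  simp only [List.mem_toFinset] at hq ⊢
  exact h hq

lemma pvM_pos (U : List (Int × Int)) (vis : List (Int × Int)) (p : Int × Int)
    (hU : p ∈ U) (hv : p ∉ vis) : 0 < pvM U vis := by
  apply Finset.card_pos.2
  exact ⟨p, by simp [Finset.mem_sdiff, List.mem_toFinset, hU, hv]⟩

lemma pvM_add_lt (U : List (Int × Int)) (vis : PySem.Set (Int × Int)) (p : Int × Int)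
    (hU : p ∈ U) (hv : p ∉ vis) : pvM U (PySem.Set.add vis p) < pvM U vis := by
  apply Finset.card_lt_card
  constructor
  · apply Finset.sdiff_subset_sdiff (Finset.Subset.refl _)
    intro q hq
    simp only [List.mem_toFinset] at hq ⊢
    exact (PySem.Set.mem_add vis p q).2 (Or.inl hq)
  · intro hsub
    have := hsub (by simp [Finset.mem_sdiff, List.mem_toFinset, hU, hv] : p ∈ U.toFinset \ vis.toFinset)
    simp only [Finset.mem_sdiff, List.mem_toFinset] at this
    exact this.2 ((PySem.Set.mem_add vis p p).2 (Or.inr rfl))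

lemma subset_add (vis : PySem.Set (Int × Int)) (p : Int × Int) : vis ⊆ PySem.Set.add vis p := by
  intro q hq
  exact (PySem.Set.mem_add vis p q).2 (Or.inl hq)

lemma pvDfsFold_grow (maze : List (List Int)) (rows cols : Int) (destination : List Int)
    (f : Nat) (hA : ∀ vis x y, vis ⊆ (pvDfsA maze rows cols destination f vis x y).2) :
    ∀ ds vis x y, vis ⊆ (pvDfsFold maze rows cols destination f vis x y ds).2 := by
  intro ds
  induction ds with
  | nil => intro vis x y; rw [pvDfsFold]; exact fun _ h => h
  | cons d ds ih =>
    intro vis x y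
    simp only [pvDfsFold]
    rcases h : pvDfsA maze rows cols destination f vis
        (pvRoll maze rows cols d.1 d.2 (pvRollFuel maze) x y).1
        (pvRoll maze rows cols d.1 d.2 (pvRollFuel maze) x y).2 with ⟨b, v⟩
    have h1 : vis ⊆ v := by
      have := hA vis (pvRoll maze rows cols d.1 d.2 (pvRollFuel maze) x y).1
        (pvRoll maze rows cols d.1 d.2 (pvRollFuel maze) x y).2
      rw [h] at this; exact this
    cases b
    · exact h1.trans (ih v x y)
    · exact h1

lemma pvDfsA_grow (maze : List (List Int)) (rows cols : Int) (destination : List Int) :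
    ∀ (f : Nat) (vis : PySem.Set (Int × Int)) (x y : Int),
      vis ⊆ (pvDfsA maze rows cols destination f vis x y).2 := by
  intro f
  induction f with
  | zero =>
    intro vis x y
    rw [pvDfsA]
    split
    · exact fun _ h => h
    · split
      · exact fun _ h => h
      · exact subset_add vis (x, y)
  | succ f ih =>
    intro vis x y
    rw [pvDfsA]
    split
    · exact fun _ h => h
    · split
      · exact fun _ h => h
      · exact (subset_add vis (x, y)).trans
          (pvDfsFold_grow maze rows cols destination f ih _ _ x y)

lemma pvRunB_irr (maze : List (List Int)) (rows cols : Int) (destination : List Int)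
    (U : List (Int × Int)) (HG : ∀ p ∈ pvGrid rows cols, p ∈ U) :
    ∀ (n : Nat) (st : List (Int × Int)) (f g : Nat) (vis : PySem.Set (Int × Int)),
      pvM U vis ≤ n → n < f → n < g → (∀ p ∈ st, p ∈ U) →
      pvRunB maze rows cols destination f st vis = pvRunB maze rows cols destination g st vis := by
  intro n
  induction n using Nat.strong_induction_on with
  | _ n IHn =>
    intro st
    induction st with
    | nil =>
      intro f g vis _ hf hg _
      rw [pvRunB_nil, pvRunB_nil]
    | cons p st IHst =>
      intro f g vis hm hf hg hst
      obtain ⟨x, y⟩ := p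
      rcases f with _ | f; · omega
      rcases g with _ | g; · omega
      rw [pvRunB_cons, pvRunB_cons]
      by_cases hd : pvIsDest destination x y = true
      · rw [if_pos hd, if_pos hd]
      · rw [if_neg hd, if_neg hd]
        by_cases hc : PySem.Set.contains vis (x, y) = true
        · rw [if_pos hc, if_pos hc]
          exact IHst (f + 1) (g + 1) vis hm hf hg (fun q hq => hst q (List.mem_cons_of_mem _ hq))
        · rw [if_neg hc, if_neg hc]
          dsimp only
          have hxy : (x, y) ∈ U := hst (x, y) (List.mem_cons_self)
          have hnv : (x, y) ∉ vis := fun h => hc ((PySem.Set.contains_iff vis (x, y)).2 h)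
          have hlt := pvM_add_lt U vis (x, y) hxy hnv
          have hpos := pvM_pos U vis (x, y) hxy hnv
          apply IHn (n - 1) (by omega) _ f g _ (by omega) (by omega) (by omega)
          intro q hq
          rcases List.mem_append.1 hq with hq | hq
          · rw [List.mem_reverse, List.mem_map] at hq
            obtain ⟨d, _, rfl⟩ := hq
            exact pvRoll_closed maze rows cols d.1 d.2 U HG _ x y hxy
          · exact hst q (List.mem_cons_of_mem _ hq)

lemma pvBridge (maze : List (List Int)) (rows cols : Int) (destination : List Int)
    (U : List (Int × Int)) (HG : ∀ p ∈ pvGrid rows cols, p ∈ U) :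
    ∀ (n : Nat) (x y : Int) (st : List (Int × Int)) (vis : PySem.Set (Int × Int)) (f : Nat),
      pvM U vis ≤ n → n < f → (x, y) ∈ U → (∀ p ∈ st, p ∈ U) →
      pvRunB maze rows cols destination f ((x, y) :: st) vis =
        (match pvDfsA maze rows cols destination f vis x y with
         | (b, v) => if b then true else pvRunB maze rows cols destination f st v) := by
  intro n
  induction n using Nat.strong_induction_on with
  | _ n IHn =>
    intro x y st vis f hm hf hxy hst
    rcases f with _ | f; · omega
    rw [pvRunB_cons, pvDfsA]
    by_cases hd : pvIsDest destination x y = true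
    · rw [if_pos hd, if_pos hd]; rfl
    · rw [if_neg hd, if_neg hd]
      by_cases hc : PySem.Set.contains vis (x, y) = true
      · rw [if_pos hc, if_pos hc]; rfl
      · rw [if_neg hc, if_neg hc]
        dsimp only
        have hnv : (x, y) ∉ vis := fun h => hc ((PySem.Set.contains_iff vis (x, y)).2 h)
        have hlt := pvM_add_lt U vis (x, y) hxy hnv
        have hpos := pvM_pos U vis (x, y) hxy hnv
        have hmap : (([((-1 : Int), (0 : Int)), (1, 0), (0, -1), (0, 1)].map
            (fun d => pvRoll maze rows cols d.1 d.2 (pvRollFuel maze) x y)).reverse)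
            = [((0 : Int), (1 : Int)), (0, -1), (1, 0), (-1, 0)].map
            (fun d => pvRoll maze rows cols d.1 d.2 (pvRollFuel maze) x y) := by
          simp
        have FB : ∀ (ds : List (Int × Int)) (vis₂ : PySem.Set (Int × Int)),
            pvM U vis₂ ≤ n - 1 →
            pvRunB maze rows cols destination f
                ((ds.map (fun d => pvRoll maze rows cols d.1 d.2 (pvRollFuel maze) x y)) ++ st) vis₂ =
              (match pvDfsFold maze rows cols destination f vis₂ x y ds with
               | (b, v) => if b then true else pvRunB maze rows cols destination f st v) := by
          intro ds
          induction ds with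
          | nil => intro vis₂ _; rw [pvDfsFold]; simp
          | cons d ds ihds =>
            intro vis₂ hm₂
            rw [pvDfsFold]
            simp only [List.map_cons, List.cons_append]
            rcases hp : pvRoll maze rows cols d.1 d.2 (pvRollFuel maze) x y with ⟨px, py⟩
            have hpU : (px, py) ∈ U := by
              rw [← hp]; exact pvRoll_closed maze rows cols d.1 d.2 U HG _ x y hxy
            rw [IHn (n - 1) (by omega) px py _ vis₂ f hm₂ (by omega) hpU
              (by
                intro q hq
                rcases List.mem_append.1 hq with hq | hq
                · rw [List.mem_map] at hq
                  obtain ⟨d', _, rfl⟩ := hq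
                  exact pvRoll_closed maze rows cols d'.1 d'.2 U HG _ x y hxy
                · exact hst q hq)]
            rcases hA : pvDfsA maze rows cols destination f vis₂ px py with ⟨b, v⟩
            cases b
            · simp only [if_false, Bool.false_eq_true]
              have hsub : vis₂ ⊆ v := by
                have := pvDfsA_grow maze rows cols destination f vis₂ px py
                rw [hA] at this; exact this
              have : pvM U v ≤ n - 1 := le_trans (pvM_le_of_subset U hsub) hm₂
              exact ihds v this
            · simp
        have hm' : pvM U (PySem.Set.add vis (x, y)) ≤ n - 1 := by omega
        rw [hmap]
        rw [FB [((0 : Int), (1 : Int)), (0, -1), (1, 0), (-1, 0)] (PySem.Set.add vis (x, y)) hm']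
        rcases hF : pvDfsFold maze rows cols destination f (PySem.Set.add vis (x, y)) x y
            [((0 : Int), (1 : Int)), (0, -1), (1, 0), (-1, 0)] with ⟨b, v⟩
        cases b
        · simp only [if_false, Bool.false_eq_true]
          have hsub : PySem.Set.add vis (x, y) ⊆ v := by
            have := pvDfsFold_grow maze rows cols destination f
              (pvDfsA_grow maze rows cols destination f)
              [((0 : Int), (1 : Int)), (0, -1), (1, 0), (-1, 0)] (PySem.Set.add vis (x, y)) x y
            rw [hF] at this; exact this
          have hv : pvM U v ≤ n - 1 := le_trans (pvM_le_of_subset U hsub) hm'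
          exact pvRunB_irr maze rows cols destination U HG (n - 1) st f (f + 1) v hv (by omega)
            (by omega) hst
        · simp

lemma pvGrid_length (rows cols : Int) :
    (pvGrid rows cols).length = rows.toNat * cols.toNat := by
  simp [pvGrid, List.length_flatMap]


-- ===== VERDICT (by name: the statement is the Claim_ definition above) =====
theorem BFSMaze_spec : Claim_equal_BFSMaze := by
  unfold Claim_equal_BFSMaze
  intro maze start destination _ hpre
  unfold Spec_BFSMaze
  obtain ⟨hne, hlen, _⟩ := hpre
  rcases start with _ | ⟨s0, _ | ⟨s1, rest⟩⟩
  · simp at hlen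
  · simp at hlen
  · unfold BFSMaze BFSMaze_alt
    simp only
    set R : Int := (maze.length : Int) with hR
    set C : Int := ((maze.headD []).length : Int) with hC
    set U : List (Int × Int) := (s0, s1) :: pvGrid R C with hU
    have HG : ∀ p ∈ pvGrid R C, p ∈ U := fun p hp => List.mem_cons_of_mem _ hp
    have hcard : pvM U PySem.Set.empty ≤ maze.length * (maze.headD []).length + 1 := by
      have h1 : pvM U PySem.Set.empty ≤ U.length := by
        unfold pvM
        have : (U.toFinset \ (PySem.Set.empty : PySem.Set (Int × Int)).toFinset).card
            ≤ U.toFinset.card := Finset.card_le_card (Finset.sdiff_subset)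
        exact le_trans this U.toFinset_card_le
      have h2 : U.length = (pvGrid R C).length + 1 := by simp [hU]
      have h3 : (pvGrid R C).length = maze.length * (maze.headD []).length := by
        rw [pvGrid_length, hR, hC, Int.toNat_natCast, Int.toNat_natCast]
      omega
    have hb := pvBridge maze R C destination U HG (pvM U PySem.Set.empty) s0 s1 []
      PySem.Set.empty (pvFuel maze) (le_refl _) (by unfold pvFuel; omega)
      (List.mem_cons_self) (by simp)
    rw [hb]
    rcases hA : pvDfsA maze R C destination (pvFuel maze) PySem.Set.empty s0 s1 with ⟨b, v⟩
    cases b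
    · simp [pvRunB_nil]
    · simp
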